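-- pv_equiv track=rewrite | github.com/raiden11/project_euler | 117.py | count_tiles
-- ===== SOURCE A (Python) =====
-- def count_tiles(tile_lengths, row_length):
--     dp = [0]*(row_length + 1)
--     dp[0] = 1
--     for i in range(1, row_length + 1):
--         for tile_length in tile_lengths:
--             if (i >= tile_length):
--                 dp[i] += dp[i-tile_length]
--     return dp[row_length]
-- ===== SOURCE B (Python) =====
-- def count_tiles(tile_lengths, row_length):
--     memo = {0: 1}
--     stack = [row_length]
--     while stack:
--         i = stack[-1]
--         if i in memo:
--             stack.pop()
--             continue
--         missing = [i - t for t in tile_lengths if t <= i and i - t not in memo]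
--         if not missing:
--             memo[i] = sum(memo[i - t] for t in tile_lengths if t <= i)
--             stack.pop()
--         else:
--             stack.extend(missing)
--     return memo[row_length]
-- ===== Notes on version B (the rewrite author's own statement) =====
-- stated objective: alternative
-- what changed: B replaces A's bottom-up dp table filled for every index 1..row_length by top-down memoized recursion driven by an explicit stack (a dict memo plus a worklist), visiting only the row lengths actually reachable from row_length; Pre_ excludes inputs where A raises IndexError (negative row_length, or a negative tile with row_length >= 1) and, for row_length >= 1, zero-length tiles, where A's finite result is an order-dependent artefact of its in-place mid-loop update and B's recursion does not terminate.
-- outside the precondition, e.g. on count_tiles([0], 1): A returns 0, B does not finish within the time limit; on count_tiles([1, 0], 2): A returns 4, B does not finish within the time limit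
import Mathlib
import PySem

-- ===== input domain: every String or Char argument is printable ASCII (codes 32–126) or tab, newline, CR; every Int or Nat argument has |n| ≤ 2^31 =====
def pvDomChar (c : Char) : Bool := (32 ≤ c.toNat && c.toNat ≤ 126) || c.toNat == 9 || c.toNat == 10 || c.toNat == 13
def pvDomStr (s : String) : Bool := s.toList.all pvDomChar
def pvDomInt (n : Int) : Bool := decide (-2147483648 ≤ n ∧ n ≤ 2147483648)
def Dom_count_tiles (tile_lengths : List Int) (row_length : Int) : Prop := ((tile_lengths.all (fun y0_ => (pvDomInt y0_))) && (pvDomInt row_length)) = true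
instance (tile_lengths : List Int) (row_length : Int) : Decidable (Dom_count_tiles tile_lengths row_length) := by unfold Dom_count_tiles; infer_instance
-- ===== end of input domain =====

-- B replaces A's bottom-up dp table by top-down memoized recursion driven by an explicit stack;
-- same return value as A on Pre_ (where A returns and the tile multiset makes the count well defined).

-- ===== PORT A =====
-- dp (a Python list) is ported as Array Int so reads/writes are constant-time like Python's.
-- dp[0] = 1 raises IndexError for row_length < 0 (dp is the empty list) and dp[i - t] raises for a
-- negative tile once i - t passes the end of dp; both are outside Pre_ below (the port reads via getD 0
-- / writes via setIfInBounds there; inside the loop i - t ≥ 0 holds, so plain indexing is Python-exact,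
-- and the final dp[row_length] is read with PySem.List.pyGet?).
def count_tiles (tile_lengths : List Int) (row_length : Int) : Int :=
  let dp : Array Int := Array.replicate (row_length + 1).toNat 0
  let dp := dp.setIfInBounds 0 1
  let dp := (PySem.List.pyRange 1 (row_length + 1) 1).foldl (fun dp i =>
      tile_lengths.foldl (fun dp t =>
        if i ≥ t then
          dp.setIfInBounds i.toNat (dp.getD i.toNat 0 + (dp[(i - t).toNat]?).getD 0)
        else dp) dp) dp
  (PySem.List.pyGet? dp.toList row_length).getD 0

-- ===== PORT B =====
-- B's memo dict is ported as Std.HashMap (a hash map, like Python's dict) so that the port's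
-- lookups are constant-time; lookup/insert semantics on Int keys are identical to PySem.Dict.
-- the local list `missing = [i - t for t in tile_lengths if t <= i and i - t not in memo]` of B's loop body
def pvMissing (tile_lengths : List Int) (memo : Std.HashMap Int Int) (i : Int) : List Int :=
  (tile_lengths.filter (fun t => decide (t ≤ i) && !(memo.contains (i - t)))).map (fun t => i - t)

-- `sum(memo[i - t] for t in tile_lengths if t <= i)` (memo[i-t] is present whenever this line runs; getD totalises)
def pvRowVal (tile_lengths : List Int) (memo : Std.HashMap Int Int) (i : Int) : Int :=
  ((tile_lengths.filter (fun t => decide (t ≤ i))).map (fun t => memo.getD (i - t) 0)).sum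

-- B's while-loop; the stack is kept top-first (Python keeps the top at the end: extend + [-1]/pop,
-- hence the push is missing.reverse ++ …, preserving Python's processing order exactly).
-- The fuel argument only makes the loop total; on Pre_ it never runs out (proved below).
def pvLoopB (tile_lengths : List Int) (row_length : Int) : Nat → Std.HashMap Int Int → List Int → Int
  | 0, memo, _ => memo.getD row_length 0
  | _ + 1, memo, [] => memo.getD row_length 0
  | fuel + 1, memo, i :: rest =>
    if memo.contains i then pvLoopB tile_lengths row_length fuel memo rest
    else if (pvMissing tile_lengths memo i).isEmpty then
      pvLoopB tile_lengths row_length fuel (memo.insert i (pvRowVal tile_lengths memo i)) rest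
    else
      pvLoopB tile_lengths row_length fuel memo ((pvMissing tile_lengths memo i).reverse ++ i :: rest)

def count_tiles_alt (tile_lengths : List Int) (row_length : Int) : Int :=
  pvLoopB tile_lengths row_length ((tile_lengths.length + 2) * (row_length.toNat + 1) + 2)
    ((∅ : Std.HashMap Int Int).insert 0 1) [row_length]

-- ===== PRECONDITION & SPEC =====
-- Pre_ excludes: row_length < 0 and (for row_length ≥ 1) negative tiles, where A raises IndexError; and
-- (for row_length ≥ 1) zero-length tiles, where A's finite result is an order-dependent artefact of its
-- in-place mid-loop update (dp[i] += dp[i]) while the tiling count is not well defined and B diverges.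
def Pre_count_tiles (tile_lengths : List Int) (row_length : Int) : Prop :=
  0 ≤ row_length ∧ (row_length = 0 ∨ ∀ t ∈ tile_lengths, 0 < t)
instance (tile_lengths : List Int) (row_length : Int) : Decidable (Pre_count_tiles tile_lengths row_length) := by unfold Pre_count_tiles; infer_instance
def pvWitness_count_tiles : List Int × Int := ([1, 2, 3], 6)

def Spec_count_tiles (tile_lengths : List Int) (row_length : Int) (out : Int) : Prop := out = count_tiles_alt tile_lengths row_length
instance (tile_lengths : List Int) (row_length : Int) (out : Int) : Decidable (Spec_count_tiles tile_lengths row_length out) := by unfold Spec_count_tiles; infer_instance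

-- ===== CLAIM (what is proved, stated in full; the proofs are below) =====
def Claim_equal_count_tiles : Prop := ∀ (tile_lengths : List Int) (row_length : Int), Dom_count_tiles tile_lengths row_length → Pre_count_tiles tile_lengths row_length → Spec_count_tiles tile_lengths row_length (count_tiles tile_lengths row_length)

-- ===== LEMMAS AND PROOFS =====

-- The common specification G: the number of tilings of a row of length n (positive tiles).
def G (tile_lengths : List Int) : Nat → Int
  | 0 => 1
  | n + 1 => (tile_lengths.map (fun t =>
      if h : 1 ≤ t ∧ t ≤ (n : Int) + 1 then G tile_lengths (n + 1 - t.toNat) else 0)).sum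
  decreasing_by omega

-- ==== A's side: the dp table is the table of G-values ====

def vfun (dp : List Int) (i : Int) (t : Int) : Int :=
  if t ≤ i then dp.getD (i - t).toNat 0 else 0

def rowF (v : Int → Int) (tiles : List Int) (acc : Int) : Int :=
  tiles.foldl (fun acc t => if t = 0 then 2 * acc else if 0 < t then acc + v t else acc) acc

def Ftab (tiles : List Int) : Nat → List Int
  | 0 => [1]
  | n + 1 => Ftab tiles n ++ [rowF (vfun (Ftab tiles n) ((n : Int) + 1)) tiles 0]

theorem length_Ftab (tiles : List Int) (n : Nat) : (Ftab tiles n).length = n + 1 := by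
  induction n with
  | zero => rfl
  | succ n ih => simp [Ftab, ih]

theorem inner_A (i : Int) (hi : 0 < i) (u rest : List Int) (hlen : u.length = i.toNat) :
    ∀ (tiles : List Int), (∀ t ∈ tiles, 0 ≤ t) → ∀ acc : Int,
    tiles.foldl (fun dp t =>
        if i ≥ t then
          dp.set i.toNat (dp.getD i.toNat 0 + (PySem.List.pyGet? dp (i - t)).getD 0)
        else dp) (u ++ acc :: rest)
      = u ++ rowF (vfun u i) tiles acc :: rest := by
  intro tiles
  induction tiles with
  | nil => intro _ acc; rfl
  | cons t ts ih =>
    intro hpos acc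
    have ht : 0 ≤ t := hpos t (List.mem_cons_self)
    have hts : ∀ x ∈ ts, 0 ≤ x := fun x hx => hpos x (List.mem_cons_of_mem _ hx)
    have hrow : rowF (vfun u i) (t :: ts) acc
        = rowF (vfun u i) ts
            (if t = 0 then 2 * acc else if 0 < t then acc + vfun u i t else acc) := rfl
    have hset : ∀ x : Int, (u ++ acc :: rest).set i.toNat x = u ++ x :: rest := by
      intro x
      rw [← hlen, List.set_append]
      simp
    have hgetD : (u ++ acc :: rest).getD i.toNat 0 = acc := by
      rw [← hlen, List.getD_eq_getElem?_getD, List.getElem?_append_right (le_refl _)]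
      simp
    rw [List.foldl_cons, hrow]
    by_cases hle : t ≤ i
    · by_cases h0 : t = 0
      · have hread : PySem.List.pyGet? (u ++ acc :: rest) (i - t) = some acc := by
          have hcast : ((u.length : Int)) = i := by omega
          rw [h0, sub_zero, ← hcast]
          exact PySem.List.pyGet?_append_length _ _ _
        rw [if_pos (show i ≥ t from hle)]
        simp only [hread, hgetD, hset, Option.getD_some]
        rw [ih hts]
        have : acc + acc = if t = 0 then 2 * acc else if 0 < t then acc + vfun u i t else acc := by
          rw [if_pos h0]; ring
        rw [this]
      · have htpos : 0 < t := lt_of_le_of_ne ht (fun h => h0 h.symm)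
        have hidx : (i - t).toNat < u.length := by omega
        have hread : PySem.List.pyGet? (u ++ acc :: rest) (i - t) = some (u.getD (i - t).toNat 0) := by
          rw [PySem.List.pyGet?_of_nonneg _ (by omega), List.getElem?_append_left hidx]
          rw [List.getElem?_eq_getElem hidx]
          congr 1
          exact (List.getD_eq_getElem u 0 hidx).symm
        rw [if_pos (show i ≥ t from hle)]
        simp only [hread, hgetD, hset, Option.getD_some]
        rw [ih hts]
        have : acc + u.getD (i - t).toNat 0
            = if t = 0 then 2 * acc else if 0 < t then acc + vfun u i t else acc := by
          rw [if_neg h0, if_pos htpos, vfun, if_pos hle]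
        rw [this]
    · rw [if_neg (show ¬ i ≥ t from hle)]
      rw [ih hts]
      have : acc = if t = 0 then 2 * acc else if 0 < t then acc + vfun u i t else acc := by
        have h0 : ¬ t = 0 := by omega
        have htpos : 0 < t := by omega
        rw [if_neg h0, if_pos htpos, vfun, if_neg hle]
        ring
      rw [← this]

theorem outer_A (tiles : List Int) (hpos : ∀ t ∈ tiles, 0 ≤ t) (n : Nat) :
    ∀ k : Nat, k ≤ n →
    (PySem.List.pyRange 1 ((k : Int) + 1) 1).foldl (fun dp i =>
        tiles.foldl (fun dp t =>
          if i ≥ t then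
            dp.set i.toNat (dp.getD i.toNat 0 + (PySem.List.pyGet? dp (i - t)).getD 0)
          else dp) dp) ((1 : Int) :: List.replicate n 0)
      = Ftab tiles k ++ List.replicate (n - k) 0 := by
  intro k
  induction k with
  | zero =>
    intro _
    rw [PySem.List.pyRange_one_eq_nil (by simp)]
    simp [Ftab]
  | succ k ih =>
    intro hk
    have hrange : PySem.List.pyRange 1 (((k + 1 : Nat) : Int) + 1) 1
        = PySem.List.pyRange 1 ((k : Int) + 1) 1 ++ [(k : Int) + 1] := by
      have := PySem.List.pyRange_one_succ_right (a := 1) (b := (k : Int) + 1) (by omega)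
      push_cast
      rw [← this]
    rw [hrange, List.foldl_append, ih (by omega)]
    have hrep : List.replicate (n - k) (0 : Int) = 0 :: List.replicate (n - (k + 1)) 0 := by
      have : n - k = (n - (k + 1)) + 1 := by omega
      rw [this, List.replicate_succ]
    rw [hrep, List.foldl_cons, List.foldl_nil]
    rw [inner_A ((k : Int) + 1) (by omega) (Ftab tiles k) (List.replicate (n - (k + 1)) 0)
      (by rw [length_Ftab]; omega) tiles hpos 0]
    simp [Ftab]

theorem arr_getD (a : Array Int) (n : Nat) (d : Int) : a.getD n d = a.toList.getD n d := by
  rw [List.getD_eq_getElem?_getD, Array.getElem?_toList]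
  by_cases h : n < a.size
  · simp [Array.getD, h]
  · simp [Array.getD, h]

-- the Array-state folds of the port compute, through toList, the list-state folds the lemmas below reason about
theorem inner_bridge (tiles : List Int) (i : Int) : ∀ (a : Array Int),
    (tiles.foldl (fun dp t =>
        if i ≥ t then
          dp.setIfInBounds i.toNat (dp.getD i.toNat 0 + (dp[(i - t).toNat]?).getD 0)
        else dp) a).toList
      = tiles.foldl (fun dp t =>
        if i ≥ t then
          dp.set i.toNat (dp.getD i.toNat 0 + (PySem.List.pyGet? dp (i - t)).getD 0)
        else dp) a.toList := by
  induction tiles with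
  | nil => intro a; rfl
  | cons t ts ih =>
    intro a
    rw [List.foldl_cons, List.foldl_cons, ih]
    congr 1
    by_cases hle : i ≥ t
    · rw [if_pos hle, if_pos hle, Array.toList_setIfInBounds, arr_getD,
        PySem.List.pyGet?_of_nonneg _ (by omega), Array.getElem?_toList]
    · rw [if_neg hle, if_neg hle]

theorem outer_bridge (tiles : List Int) : ∀ (xs : List Int) (a : Array Int),
    (xs.foldl (fun dp i =>
        tiles.foldl (fun dp t =>
          if i ≥ t then
            dp.setIfInBounds i.toNat (dp.getD i.toNat 0 + (dp[(i - t).toNat]?).getD 0)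
          else dp) dp) a).toList
      = xs.foldl (fun dp i =>
        tiles.foldl (fun dp t =>
          if i ≥ t then
            dp.set i.toNat (dp.getD i.toNat 0 + (PySem.List.pyGet? dp (i - t)).getD 0)
          else dp) dp) a.toList := by
  intro xs
  induction xs with
  | nil => intro a; rfl
  | cons x xs ih =>
    intro a
    rw [List.foldl_cons, List.foldl_cons, ih]
    congr 1
    exact inner_bridge tiles x a

theorem A_eq_F (tiles : List Int) (hpos : ∀ t ∈ tiles, 0 ≤ t) (n : Nat) :
    count_tiles tiles n = (Ftab tiles n).getD n 0 := by
  unfold count_tiles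
  show (PySem.List.pyGet? (((PySem.List.pyRange 1 ((n : Int) + 1) 1).foldl (fun dp i =>
      tiles.foldl (fun dp t =>
        if i ≥ t then
          dp.setIfInBounds i.toNat (dp.getD i.toNat 0 + (dp[(i - t).toNat]?).getD 0)
        else dp) dp) ((Array.replicate ((n : Int) + 1).toNat 0).setIfInBounds 0 1)).toList) (n : Int)).getD 0
    = (Ftab tiles n).getD n 0
  rw [outer_bridge, Array.toList_setIfInBounds, Array.toList_replicate]
  show (PySem.List.pyGet? ((PySem.List.pyRange 1 ((n : Int) + 1) 1).foldl (fun dp i =>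
      tiles.foldl (fun dp t =>
        if i ≥ t then
          dp.set i.toNat (dp.getD i.toNat 0 + (PySem.List.pyGet? dp (i - t)).getD 0)
        else dp) dp) ((List.replicate ((n : Int) + 1).toNat (0 : Int)).set 0 1)) (n : Int)).getD 0
    = (Ftab tiles n).getD n 0
  have h1 : ((n : Int) + 1).toNat = n + 1 := by omega
  have h2 : (List.replicate (n + 1) (0 : Int)).set 0 1 = (1 : Int) :: List.replicate n 0 := by
    rw [List.replicate_succ, List.set_cons_zero]
  rw [h1, h2, outer_A tiles hpos n n (le_refl n)]
  have hidx : n < (Ftab tiles n).length := by rw [length_Ftab]; omega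
  simp only [Nat.sub_self, List.replicate_zero, List.append_nil]
  rw [PySem.List.pyGet?_natCast, List.getElem?_eq_getElem hidx]
  simp [List.getD_eq_getElem?_getD, List.getElem?_eq_getElem hidx]

theorem rowF_pos (v : Int → Int) (tiles : List Int) (hpos : ∀ t ∈ tiles, 0 < t) (acc : Int) :
    rowF v tiles acc = acc + (tiles.map v).sum := by
  induction tiles generalizing acc with
  | nil => simp [rowF]
  | cons t ts ih =>
    have ht : 0 < t := hpos t (List.mem_cons_self)
    have hstep : rowF v (t :: ts) acc
        = rowF v ts (if t = 0 then 2 * acc else if 0 < t then acc + v t else acc) := rfl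
    rw [hstep, if_neg (by omega), if_pos ht,
      ih (fun x hx => hpos x (List.mem_cons_of_mem _ hx))]
    simp [List.sum_cons]
    ring

theorem Ftab_getD_G (tiles : List Int) (hpos : ∀ t ∈ tiles, 0 < t) :
    ∀ n, ∀ i ≤ n, (Ftab tiles n).getD i 0 = G tiles i := by
  intro n
  induction n with
  | zero =>
    intro i hi
    have : i = 0 := by omega
    subst this
    simp [Ftab, G]
  | succ n ih =>
    intro i hi
    by_cases hi' : i ≤ n
    · have hlt : i < (Ftab tiles n).length := by rw [length_Ftab]; omega
      rw [Ftab, List.getD_append _ _ _ _ hlt]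
      exact ih i hi'
    · have hieq : i = n + 1 := by omega
      subst hieq
      have hlen : (Ftab tiles n).length = n + 1 := length_Ftab tiles n
      have hget : (Ftab tiles (n + 1)).getD (n + 1) 0
          = rowF (vfun (Ftab tiles n) ((n : Int) + 1)) tiles 0 := by
        rw [Ftab, List.getD_eq_getElem?_getD, List.getElem?_append_right (by omega)]
        simp [hlen]
      rw [hget, rowF_pos _ _ hpos, zero_add]
      show (tiles.map (vfun (Ftab tiles n) ((n : Int) + 1))).sum = G tiles (n + 1)
      rw [G]
      congr 1
      apply List.map_congr_left
      intro t htm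
      have ht : 0 < t := hpos t htm
      by_cases hle : t ≤ (n : Int) + 1
      · rw [vfun, if_pos hle, dif_pos ⟨by omega, hle⟩]
        have htn : ((n : Int) + 1 - t).toNat ≤ n := by omega
        rw [ih _ htn]
        congr 1
        omega
      · rw [vfun, if_neg hle, dif_neg (by omega)]

-- ==== B's side ====

def MemoOK (tiles : List Int) (memo : Std.HashMap Int Int) : Prop :=
  memo.contains 0 = true ∧
  ∀ k, memo.contains k = true → 0 ≤ k ∧ memo.getD k 0 = G tiles k.toNat

theorem pvLoopB_nil (tiles : List Int) (r : Int) (memo : Std.HashMap Int Int) :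
    ∀ f, pvLoopB tiles r f memo [] = memo.getD r 0 := by
  intro f; cases f <;> rfl

theorem sum_map_filter_eq (l : List Int) (p : Int → Bool) (f : Int → Int) :
    ((l.filter p).map f).sum = (l.map (fun t => if p t then f t else 0)).sum := by
  induction l with
  | nil => rfl
  | cons a l ih => by_cases hp : p a <;> simp [hp, ih]

theorem pvRowVal_eq_G (tiles : List Int) (hpos : ∀ t ∈ tiles, 0 < t)
    (memo : Std.HashMap Int Int) (hOK : MemoOK tiles memo) (c : Int) (hc : 1 ≤ c)
    (hall : ∀ t ∈ tiles, t ≤ c → memo.contains (c - t) = true) :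
    pvRowVal tiles memo c = G tiles c.toNat := by
  obtain ⟨m, hm⟩ : ∃ m : Nat, c.toNat = m + 1 := ⟨c.toNat - 1, by omega⟩
  have hcm : c = (m : Int) + 1 := by omega
  rw [pvRowVal, sum_map_filter_eq, hm, G]
  congr 1
  apply List.map_congr_left
  intro t htm
  have ht : 0 < t := hpos t htm
  by_cases hle : t ≤ c
  · have hcon := hall t htm hle
    have hget := (hOK.2 _ hcon).2
    rw [if_pos (by simpa using hle), dif_pos ⟨by omega, by omega⟩, hget]
    congr 1
    omega
  · rw [if_neg (by simpa using hle), dif_neg (by omega)]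

theorem bloop_run (tiles : List Int) (hpos : ∀ t ∈ tiles, 0 < t) (r : Int) :
    ∀ (b : Nat) (L : List Int), (∀ c ∈ L, 0 ≤ c ∧ c ≤ (b : Int)) →
    ∀ (memo : Std.HashMap Int Int), MemoOK tiles memo →
    ∃ (memo' : Std.HashMap Int Int) (u : Nat),
      MemoOK tiles memo' ∧
      (∀ k, memo.contains k = true → memo'.contains k = true) ∧
      (∀ k, memo'.contains k = true → memo.contains k = true ∨ (0 ≤ k ∧ k ≤ (b : Int))) ∧
      (∀ c ∈ L, memo'.contains c = true) ∧
      u + memo.size * (tiles.length + 2) ≤ memo'.size * (tiles.length + 2) + L.length ∧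
      (∀ (f : Nat) (rest : List Int),
        pvLoopB tiles r (u + f) memo (L ++ rest) = pvLoopB tiles r f memo' rest) := by
  intro b
  induction b using Nat.strong_induction_on with
  | _ b IHb =>
  intro L
  induction L with
  | nil =>
    intro _ memo hOK
    exact ⟨memo, 0, hOK, fun _ h => h, fun k h => Or.inl h, by simp, by omega,
      fun f rest => by simp⟩
  | cons c L' IHL =>
    intro hLb memo hOK
    have hcb : 0 ≤ c ∧ c ≤ (b : Int) := hLb c List.mem_cons_self
    have hL'b : ∀ x ∈ L', 0 ≤ x ∧ x ≤ (b : Int) := fun x hx => hLb x (List.mem_cons_of_mem _ hx)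
    by_cases hc : memo.contains c = true
    · -- the top of the stack is already memoized: pop it
      obtain ⟨memo', u', hOK', hmono, hbound, hLmem, hineq, hrun⟩ := IHL hL'b memo hOK
      refine ⟨memo', u' + 1, hOK', hmono, hbound, ?_,
        by simp only [List.length_cons]; omega, ?_⟩
      · intro x hx
        rcases List.mem_cons.mp hx with heq | hx'
        · exact heq ▸ hmono _ hc
        · exact hLmem x hx'
      · intro f rest
        have h1 : u' + 1 + f = (u' + f) + 1 := by omega
        rw [h1]
        show pvLoopB tiles r ((u' + f) + 1) memo (c :: (L' ++ rest)) = _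
        rw [pvLoopB, if_pos hc, hrun]
    · have hcf : memo.contains c = false := by simpa using hc
      have hc0 : c ≠ 0 := fun h => by rw [h, hOK.1] at hcf; cases hcf
      have hc1 : 1 ≤ c := by omega
      have hinsOK : ∀ memo₀ : Std.HashMap Int Int, MemoOK tiles memo₀ →
          pvRowVal tiles memo₀ c = G tiles c.toNat →
          MemoOK tiles (memo₀.insert c (pvRowVal tiles memo₀ c)) := by
        intro memo₀ hOK₀ hval₀
        constructor
        · rw [Std.HashMap.contains_insert, hOK₀.1, Bool.or_true]
        · intro k hk
          by_cases hkc : k = c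
          · subst hkc
            exact ⟨hcb.1, by rw [Std.HashMap.getD_insert_self, hval₀]⟩
          · have hk' : memo₀.contains k = true := by
              rw [Std.HashMap.contains_insert, Bool.or_eq_true] at hk
              rcases hk with hk | hk
              · exact absurd (beq_iff_eq.mp hk).symm hkc
              · exact hk
            refine ⟨(hOK₀.2 k hk').1, ?_⟩
            rw [Std.HashMap.getD_insert, if_neg (by simp only [beq_iff_eq]; exact fun h => hkc h.symm)]
            exact (hOK₀.2 k hk').2
      have hinsSize : ∀ memo₀ : Std.HashMap Int Int, memo₀.contains c = false →
          ∀ v : Int, (memo₀.insert c v).size = memo₀.size + 1 := by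
        intro memo₀ h₀ v
        rw [Std.HashMap.size_insert, if_neg]
        intro hmem
        rw [Std.HashMap.mem_iff_contains, h₀] at hmem
        cases hmem
      have hinsMono : ∀ (memo₀ : Std.HashMap Int Int) (v : Int) (k : Int),
          memo₀.contains k = true → (memo₀.insert c v).contains k = true := by
        intro memo₀ v k hk
        rw [Std.HashMap.contains_insert, hk, Bool.or_true]
      have hinsBound : ∀ (memo₀ : Std.HashMap Int Int) (v : Int) (k : Int),
          (memo₀.insert c v).contains k = true → memo₀.contains k = true ∨ k = c := by
        intro memo₀ v k hk
        rw [Std.HashMap.contains_insert, Bool.or_eq_true] at hk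
        rcases hk with hk | hk
        · exact Or.inr (beq_iff_eq.mp hk).symm
        · exact Or.inl hk
      by_cases hm : pvMissing tiles memo c = []
      · -- every needed sub-row is memoized: record G c and pop
        have hall : ∀ t ∈ tiles, t ≤ c → memo.contains (c - t) = true := by
          intro t htm htc
          by_contra hcontra
          have hmem : (c - t) ∈ pvMissing tiles memo c := by
            unfold pvMissing
            refine List.mem_map.mpr ⟨t, List.mem_filter.mpr ⟨htm, ?_⟩, rfl⟩
            simp only [Bool.and_eq_true, decide_eq_true_eq, Bool.not_eq_true']
            exact ⟨htc, by simpa using hcontra⟩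
          rw [hm] at hmem
          exact absurd hmem (List.not_mem_nil)
        have hval : pvRowVal tiles memo c = G tiles c.toNat :=
          pvRowVal_eq_G tiles hpos memo hOK c hc1 hall
        obtain ⟨memo', u', hOK', hmono, hbound, hLmem, hineq, hrun⟩ :=
          IHL hL'b (memo.insert c (pvRowVal tiles memo c)) (hinsOK memo hOK hval)
        refine ⟨memo', u' + 1, hOK', ?_, ?_, ?_, ?_, ?_⟩
        · intro k hk
          exact hmono k (hinsMono memo _ k hk)
        · intro k hk
          rcases hbound k hk with hk₁ | hb
          · rcases hinsBound memo _ k hk₁ with hk₁ | hk₁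
            · exact Or.inl hk₁
            · exact Or.inr (hk₁ ▸ hcb)
          · exact Or.inr hb
        · intro x hx
          rcases List.mem_cons.mp hx with heq | hx'
          · exact heq ▸ hmono _ (Std.HashMap.contains_insert_self)
          · exact hLmem x hx'
        · have hsz := hinsSize memo hcf (pvRowVal tiles memo c)
          have hmul : (memo.insert c (pvRowVal tiles memo c)).size * (tiles.length + 2)
              = memo.size * (tiles.length + 2) + (tiles.length + 2) := by
            rw [hsz]; ring
          simp only [List.length_cons]
          omega
        · intro f rest
          have h1 : u' + 1 + f = (u' + f) + 1 := by omega
          rw [h1]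
          show pvLoopB tiles r ((u' + f) + 1) memo (c :: (L' ++ rest)) = _
          rw [pvLoopB, if_neg (by rw [hcf]; exact Bool.false_ne_true), if_pos (by rw [hm]; rfl),
            hrun]
      · -- some sub-rows are missing: push them, resolve them (IHb), then record G c and pop
        have hmsb : ∀ j ∈ (pvMissing tiles memo c).reverse,
            0 ≤ j ∧ j ≤ (((c - 1).toNat : Nat) : Int) := by
          intro j hj
          rw [List.mem_reverse] at hj
          unfold pvMissing at hj
          obtain ⟨t, htf, rfl⟩ := List.mem_map.mp hj
          have htm := (List.mem_filter.mp htf).1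
          have htc : t ≤ c := by
            have := (List.mem_filter.mp htf).2
            simp only [Bool.and_eq_true, decide_eq_true_eq] at this
            exact this.1
          have ht := hpos t htm
          constructor
          · omega
          · have : (((c - 1).toNat : Nat) : Int) = c - 1 := by omega
            omega
        have hb' : (c - 1).toNat < b := by omega
        obtain ⟨memo₁, u₁, hOK₁, hmono₁, hbound₁, hLm₁, hineq₁, hrun₁⟩ :=
          IHb (c - 1).toNat hb' (pvMissing tiles memo c).reverse hmsb memo hOK
        have hc₁ : memo₁.contains c = false := by
          by_contra h
          have h' : memo₁.contains c = true := by simpa using h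
          rcases hbound₁ c h' with h₂ | ⟨_, h₂⟩
          · rw [h₂] at hcf; cases hcf
          · have : (((c - 1).toNat : Nat) : Int) = c - 1 := by omega
            omega
        have hall₁ : ∀ t ∈ tiles, t ≤ c → memo₁.contains (c - t) = true := by
          intro t htm htc
          by_cases hin : memo.contains (c - t) = true
          · exact hmono₁ _ hin
          · apply hLm₁
            rw [List.mem_reverse]
            unfold pvMissing
            refine List.mem_map.mpr ⟨t, List.mem_filter.mpr ⟨htm, ?_⟩, rfl⟩
            simp only [Bool.and_eq_true, decide_eq_true_eq, Bool.not_eq_true']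
            exact ⟨htc, by simpa using hin⟩
        have hm₁ : pvMissing tiles memo₁ c = [] := by
          unfold pvMissing
          rw [List.map_eq_nil_iff, List.filter_eq_nil_iff]
          intro t htm
          simp only [Bool.and_eq_true, decide_eq_true_eq, Bool.not_eq_true', not_and]
          intro htc
          rw [hall₁ t htm htc]
          simp
        have hval₁ : pvRowVal tiles memo₁ c = G tiles c.toNat :=
          pvRowVal_eq_G tiles hpos memo₁ hOK₁ c hc1 hall₁
        obtain ⟨memo', u', hOK', hmono', hbound', hLmem', hineq', hrun'⟩ :=
          IHL hL'b (memo₁.insert c (pvRowVal tiles memo₁ c)) (hinsOK memo₁ hOK₁ hval₁)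
        refine ⟨memo', 1 + u₁ + 1 + u', hOK', ?_, ?_, ?_, ?_, ?_⟩
        · intro k hk
          exact hmono' k (hinsMono memo₁ _ k (hmono₁ k hk))
        · intro k hk
          rcases hbound' k hk with hk₂ | hb
          · rcases hinsBound memo₁ _ k hk₂ with hk₂ | hk₂
            · rcases hbound₁ k hk₂ with hk₃ | ⟨h₃, h₄⟩
              · exact Or.inl hk₃
              · refine Or.inr ⟨h₃, ?_⟩
                have : (((c - 1).toNat : Nat) : Int) = c - 1 := by omega
                omega
            · exact Or.inr (hk₂ ▸ hcb)
          · exact Or.inr hb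
        · intro x hx
          rcases List.mem_cons.mp hx with heq | hx'
          · exact heq ▸ hmono' _ (Std.HashMap.contains_insert_self)
          · exact hLmem' x hx'
        · have hmslen : (pvMissing tiles memo c).length ≤ tiles.length := by
            unfold pvMissing
            rw [List.length_map]
            exact List.length_filter_le _ _
          have hsz := hinsSize memo₁ hc₁ (pvRowVal tiles memo₁ c)
          have hmul : (memo₁.insert c (pvRowVal tiles memo₁ c)).size * (tiles.length + 2)
              = memo₁.size * (tiles.length + 2) + (tiles.length + 2) := by
            rw [hsz]; ring
          simp only [List.length_cons, List.length_reverse] at *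
          omega
        · intro f rest
          have h1 : 1 + u₁ + 1 + u' + f = (u₁ + (1 + u' + f)) + 1 := by omega
          rw [h1]
          show pvLoopB tiles r ((u₁ + (1 + u' + f)) + 1) memo (c :: (L' ++ rest)) = _
          have hne : (pvMissing tiles memo c).isEmpty = false := by
            rw [List.isEmpty_eq_false_iff]
            exact hm
          rw [pvLoopB, if_neg (by rw [hcf]; exact Bool.false_ne_true),
            if_neg (by rw [hne]; exact Bool.false_ne_true)]
          rw [hrun₁ (1 + u' + f) (c :: (L' ++ rest))]
          have h2 : 1 + u' + f = (u' + f) + 1 := by omega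
          rw [h2, pvLoopB, if_neg (by rw [hc₁]; exact Bool.false_ne_true),
            if_pos (by rw [hm₁]; rfl), hrun']

theorem alt_eq_G (tiles : List Int) (hpos : ∀ t ∈ tiles, 0 < t) (r : Int) (hr : 0 ≤ r) :
    count_tiles_alt tiles r = G tiles r.toNat := by
  have hOK₀ : MemoOK tiles ((∅ : Std.HashMap Int Int).insert 0 1) := by
    constructor
    · exact Std.HashMap.contains_insert_self
    · intro k hk
      rw [Std.HashMap.contains_insert, Std.HashMap.contains_empty, Bool.or_false] at hk
      have hk0 : k = 0 := (by simpa using hk : (0 : Int) = k).symm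
      subst hk0
      exact ⟨le_refl 0, by rw [Std.HashMap.getD_insert_self]; simp [G]⟩
  obtain ⟨memo', u, hOK', _, hbound, hLmem, hineq, hrun⟩ :=
    bloop_run tiles hpos r r.toNat [r] (by
      intro c hc
      rcases List.mem_singleton.mp hc with rfl
      exact ⟨hr, by omega⟩) _ hOK₀
  have hlen₀ : ((∅ : Std.HashMap Int Int).insert 0 1).size = 1 := by
    simp [Std.HashMap.size_insert]
  -- all keys of memo' lie in [0, r], and they are distinct: at most r.toNat + 1 of them
  have hkc : ∀ k ∈ memo'.keys, memo'.contains k = true := by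
    intro k hk
    rw [← Std.HashMap.mem_iff_contains, ← Std.HashMap.mem_keys]
    exact hk
  have hknn : ∀ k, memo'.contains k = true → 0 ≤ k ∧ k ≤ (r.toNat : Int) := by
    intro k hck
    rcases hbound k hck with h | h
    · rw [Std.HashMap.contains_insert, Std.HashMap.contains_empty, Bool.or_false] at h
      have : k = 0 := (by simpa using h : (0 : Int) = k).symm
      omega
    · exact h
  have hkb : ∀ k ∈ memo'.keys, k.toNat < r.toNat + 1 := by
    intro k hk
    have := hknn k (hkc k hk)
    omega
  have hndK : memo'.keys.Nodup :=
    Std.HashMap.distinct_keys.imp (fun hab => by simpa using hab)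
  have hndN : (memo'.keys.map Int.toNat).Nodup := by
    refine (List.nodup_map_iff_inj_on hndK).mpr ?_
    intro x hx y hy hxy
    have h1 := hknn x (hkc x hx)
    have h2 := hknn y (hkc y hy)
    omega
  have hNlen : memo'.size ≤ r.toNat + 1 := by
    have hsub : (memo'.keys.map Int.toNat) ⊆ List.range (r.toNat + 1) := by
      intro x hx
      obtain ⟨k, hk, rfl⟩ := List.mem_map.mp hx
      exact List.mem_range.mpr (hkb k hk)
    have hle := (List.subperm_of_subset hndN hsub).length_le
    rw [← Std.HashMap.length_keys]
    simpa using hle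
  have hu : u ≤ (tiles.length + 2) * (r.toNat + 1) + 2 := by
    rw [hlen₀] at hineq
    simp only [List.length_singleton] at hineq
    have h1 : memo'.size * (tiles.length + 2)
        ≤ (r.toNat + 1) * (tiles.length + 2) := Nat.mul_le_mul_right _ hNlen
    have h2 : (r.toNat + 1) * (tiles.length + 2)
        = (tiles.length + 2) * (r.toNat + 1) := Nat.mul_comm _ _
    omega
  have hF : (tiles.length + 2) * (r.toNat + 1) + 2
      = u + ((tiles.length + 2) * (r.toNat + 1) + 2 - u) := by omega
  unfold count_tiles_alt
  rw [hF]
  have h := hrun ((tiles.length + 2) * (r.toNat + 1) + 2 - u) []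
  rw [List.append_nil] at h
  rw [h, pvLoopB_nil]
  have hcr : memo'.contains r = true := hLmem r (List.mem_singleton.mpr rfl)
  exact (hOK'.2 r hcr).2

theorem alt_zero (tiles : List Int) : count_tiles_alt tiles 0 = 1 := by
  unfold count_tiles_alt
  have hf : (tiles.length + 2) * ((0 : Int).toNat + 1) + 2 = (tiles.length + 3) + 1 := by
    norm_num
  rw [hf, pvLoopB, if_pos Std.HashMap.contains_insert_self,
    pvLoopB_nil, Std.HashMap.getD_insert_self]

-- ===== VERDICT (by name: the statement is the Claim_ definition above) =====
theorem count_tiles_spec : Claim_equal_count_tiles := by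
  intro tiles r _hD hPre
  unfold Spec_count_tiles
  obtain ⟨h0, hcase⟩ := hPre
  rcases hcase with h | hpos
  · subst h
    have hA : count_tiles tiles 0 = 1 := by simp [count_tiles]
    rw [hA, alt_zero]
  · obtain ⟨n, rfl⟩ : ∃ n : Nat, r = (n : Int) := ⟨r.toNat, (Int.toNat_of_nonneg h0).symm⟩
    rw [A_eq_F tiles (fun t ht => le_of_lt (hpos t ht)) n,
      Ftab_getD_G tiles hpos n n (le_refl n), alt_eq_G tiles hpos n (by omega)]
    simp
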